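-- pv_equiv track=rewrite | github.com/jones2000/HQChart | umychart_python/umychart_complier_jsalgorithm.py | COUNT
-- ===== SOURCE A (Python) =====
-- def COUNT(data,n):
--     dataLen=len(data)
--     result=[None]*dataLen
--
--     for i in range(dataLen) :
--         count=0
--         for j in range(n) :
--             if i-j<0 :
--                 break
--             if data[i-j] :
--                 count+=1
--         result[i]=count
--
--     return result
-- ===== SOURCE B (Python) =====
-- def COUNT(data, n):
--     if n <= 0:
--         return [0] * len(data)
--     result = []
--     c = 0
--     for i, v in enumerate(data):
--         if v:
--             c += 1
--         if i >= n and data[i - n]: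
--             c -= 1
--         result.append(c)
--     return result
-- ===== Notes on version B (the rewrite author's own statement) =====
-- stated objective: faster
-- what changed: B replaces A's inner rescan of the whole length-n window at every index with a single-pass sliding running count that adds the entering element and subtracts the element leaving the window.
import Mathlib
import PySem

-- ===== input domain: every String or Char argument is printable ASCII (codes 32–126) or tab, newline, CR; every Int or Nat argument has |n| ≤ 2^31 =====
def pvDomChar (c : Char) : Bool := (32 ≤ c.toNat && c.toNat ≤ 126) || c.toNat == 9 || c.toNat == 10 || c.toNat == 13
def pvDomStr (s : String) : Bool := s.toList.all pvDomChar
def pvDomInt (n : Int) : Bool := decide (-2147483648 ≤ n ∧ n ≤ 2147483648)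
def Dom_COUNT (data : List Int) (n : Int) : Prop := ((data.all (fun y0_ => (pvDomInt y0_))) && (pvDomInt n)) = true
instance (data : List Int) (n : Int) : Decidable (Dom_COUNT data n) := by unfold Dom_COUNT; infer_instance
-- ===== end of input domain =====

-- B replaces A's rescan of the whole window at every index by a sliding running count
-- (add the entering element, subtract the leaving one); same return value everywhere.

-- ===== PORT A =====
-- inner 'for j in range(n): if i-j<0: break; if data[i-j]: count+=1' as a counter loop
-- (j runs 0,1,… while j < n, stopping at the break, exactly like Python's range iterator);
-- the index i-j is only read when 0 ≤ i-j ≤ i < len(data), so pyGetD is exact there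
def countInnerA (data : List Int) (i n : Int) (j : Int) (count : Int) : Int :=
  if h : j < n then
    if i - j < 0 then count
    else if PySem.List.pyGetD data (i - j) 0 ≠ 0 then countInnerA data i n (j + 1) (count + 1)
    else countInnerA data i n (j + 1) count
  else count
termination_by (n - j).toNat
decreasing_by all_goals omega

def COUNT (data : List Int) (n : Int) : List Int :=
  (PySem.List.pyRange 0 (data.length : Int) 1).map
    (fun i => countInnerA data i n 0 0)

-- ===== PORT B =====
-- sliding-window loop of Source B: state (c, result); data[i-n] is only read when 0 < n ≤ i < len(data),
-- so pyGetD is exact there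
def COUNT_alt (data : List Int) (n : Int) : List Int :=
  if n ≤ 0 then List.replicate data.length 0
  else
    ((PySem.List.enumerate data).foldl
      (fun (st : Int × List Int) iv =>
        let c1 := if iv.2 ≠ 0 then st.1 + 1 else st.1
        let c2 := if n ≤ iv.1 ∧ PySem.List.pyGetD data (iv.1 - n) 0 ≠ 0 then c1 - 1 else c1
        (c2, st.2 ++ [c2])) (0, [])).2

-- ===== PRECONDITION & SPEC =====
def Spec_COUNT (data : List Int) (n : Int) (out : List Int) : Prop := out = COUNT_alt data n
instance (data : List Int) (n : Int) (out : List Int) : Decidable (Spec_COUNT data n out) := by unfold Spec_COUNT; infer_instance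

-- ===== CLAIM (what is proved, stated in full; the proofs are below) =====
def Claim_equal_COUNT : Prop := ∀ (data : List Int) (n : Int), Dom_COUNT data n → Spec_COUNT data n (COUNT data n)

-- ===== LEMMAS AND PROOFS =====

-- truth value (0/1) of data[k]
def Tv (data : List Int) (k : Nat) : Int := if data.getD k 0 ≠ 0 then 1 else 0

-- number of truthy elements among data[i-j] for j < nn with j ≤ i (the window ending at i)
def Fw (data : List Int) (nn : Nat) (i : Nat) : Int :=
  ∑ j ∈ Finset.range nn, if j ≤ i then Tv data (i - j) else 0

lemma innerA_eq (data : List Int) (i : Nat) (n : Int) :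
    ∀ (k : Nat) (j : Nat) (c : Int), (n - (j : Int)).toNat = k →
      countInnerA data (i : Int) n (j : Int) c
        = c + ∑ t ∈ Finset.range k, if j + t ≤ i then Tv data (i - (j + t)) else 0 := by
  intro k
  induction k with
  | zero =>
    intro j c hk
    rw [countInnerA, dif_neg (by omega)]
    simp
  | succ k ih =>
    intro j c hk
    rw [countInnerA, dif_pos (by omega)]
    by_cases ha : j ≤ i
    · have h1 : ¬ ((i : Int) - (j : Int) < 0) := by omega
      have h2 : (i : Int) - (j : Int) = ((i - j : Nat) : Int) := by omega
      rw [if_neg h1, h2]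
      rw [Finset.sum_range_succ']
      have hcast : (j : Int) + 1 = ((j + 1 : Nat) : Int) := by push_cast; ring
      have hsum : ∀ c' : Int,
          c' + (∑ t ∈ Finset.range k, if j + 1 + t ≤ i then Tv data (i - (j + 1 + t)) else 0)
            = c' + ∑ t ∈ Finset.range k, if j + (t + 1) ≤ i then Tv data (i - (j + (t + 1))) else 0 := by
        intro c'
        congr 1
        apply Finset.sum_congr rfl
        intro t _
        have he : j + 1 + t = j + (t + 1) := by omega
        rw [he]
      by_cases hv : data.getD (i - j) 0 ≠ 0
      · rw [if_pos (by simpa using hv), hcast, ih (j + 1) (c + 1) (by omega), hsum (c + 1)]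
        have hv' : ¬ data[i - j]?.getD 0 = 0 := by
          rw [← List.getD_eq_getElem?_getD]; exact hv
        simp [Tv, ha, hv']
        ring
      · rw [if_neg (by simpa using hv), hcast, ih (j + 1) c (by omega), hsum c]
        have hv' : data[i - j]?.getD 0 = 0 := by
          rw [← List.getD_eq_getElem?_getD]; exact not_not.mp hv
        simp [Tv, ha, hv']
    · have h1 : (i : Int) - (j : Int) < 0 := by omega
      rw [if_pos h1]
      have hz : ∀ t ∈ Finset.range (k + 1), (if j + t ≤ i then Tv data (i - (j + t)) else 0) = 0 := by
        intro t _; rw [if_neg (by omega)]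
      rw [Finset.sum_congr rfl hz]
      simp

lemma countA_eq (data : List Int) (n : Int) (i : Nat) :
    countInnerA data (i : Int) n 0 0 = Fw data n.toNat i := by
  have h := innerA_eq data i n n.toNat 0 0 (by omega)
  simp only [Nat.cast_zero] at h
  rw [h]
  simp [Fw]

-- closed form for A
lemma COUNT_eq (data : List Int) (n : Int) :
    COUNT data n = (List.range data.length).map (fun i => Fw data n.toNat i) := by
  unfold COUNT
  rw [show PySem.List.pyRange 0 (data.length : Int) 1
        = (List.range data.length).map (fun k : Nat => (k : Int)) by
      rw [PySem.List.pyRange_one]; simp]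
  rw [List.map_map]
  apply List.map_congr_left
  intro i _
  simp only [Function.comp_apply]
  exact countA_eq data n i

lemma Fw_zero (data : List Int) (nn : Nat) (h : 1 ≤ nn) : Fw data nn 0 = Tv data 0 := by
  unfold Fw
  rw [Finset.sum_eq_single 0]
  · simp
  · intro j _ hj; rw [if_neg (by omega)]
  · intro h0; exact absurd (Finset.mem_range.mpr (by omega)) h0

lemma Fw_succ (data : List Int) (nn : Nat) (h : 1 ≤ nn) (i : Nat) :
    Fw data nn (i + 1)
      = Fw data nn i + Tv data (i + 1) - (if nn ≤ i + 1 then Tv data (i + 1 - nn) else 0) := by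
  obtain ⟨k, rfl⟩ : ∃ k, nn = k + 1 := ⟨nn - 1, by omega⟩
  unfold Fw
  rw [Finset.sum_range_succ', Finset.sum_range_succ]
  have e1 : ∀ j, (if j + 1 ≤ i + 1 then Tv data (i + 1 - (j + 1)) else 0)
      = (if j ≤ i then Tv data (i - j) else 0) := by
    intro j
    by_cases hj : j ≤ i
    · rw [if_pos (by omega), if_pos hj]; congr 1; omega
    · rw [if_neg (by omega), if_neg hj]
  simp only [e1]
  simp
  ring

-- B's loop invariant value of c before processing index m
def Gv (data : List Int) (nn : Nat) : Nat → Int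
  | 0 => 0
  | m + 1 => Fw data nn m

lemma foldB_eq (data : List Int) (n : Int) (hn : 0 < n) :
    ∀ (rest : List Int) (m : Nat), m ≤ data.length → data.drop m = rest →
      (PySem.List.enumerate rest (m : Int)).foldl
        (fun (st : Int × List Int) iv =>
          let c1 := if iv.2 ≠ 0 then st.1 + 1 else st.1
          let c2 := if n ≤ iv.1 ∧ PySem.List.pyGetD data (iv.1 - n) 0 ≠ 0 then c1 - 1 else c1
          (c2, st.2 ++ [c2]))
        (Gv data n.toNat m, (List.range m).map (fun i => Fw data n.toNat i))
      = (Gv data n.toNat data.length,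
         (List.range data.length).map (fun i => Fw data n.toNat i)) := by
  intro rest
  induction rest with
  | nil =>
    intro m hm hdrop
    have hlen : m = data.length := by
      have := List.drop_eq_nil_iff.mp hdrop
      omega
    subst hlen
    simp [PySem.List.enumerate]
  | cons v rest ih =>
    intro m hm hdrop
    have hmlt : m < data.length := by
      have := congrArg List.length hdrop
      simp at this
      omega
    have hv : data.getD m 0 = v := by
      have hg : data[m]? = some v := by
        have h0 : (List.drop m data)[0]? = data[m + 0]? := List.getElem?_drop
        rw [hdrop] at h0
        simpa using h0.symm
      simp [List.getD_eq_getElem?_getD, hg]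
    have hdrop' : data.drop (m + 1) = rest := by
      have : data.drop (m + 1) = (data.drop m).drop 1 := by
        rw [List.drop_drop]
      rw [this, hdrop]
      rfl
    rw [PySem.List.enumerate_cons, List.foldl_cons]
    dsimp only
    have hc2 :
        (if n ≤ (m : Int) ∧ PySem.List.pyGetD data ((m : Int) - n) 0 ≠ 0 then
            (if v ≠ 0 then Gv data n.toNat m + 1 else Gv data n.toNat m) - 1
          else (if v ≠ 0 then Gv data n.toNat m + 1 else Gv data n.toNat m))
          = Fw data n.toNat m := by
      have hnn1 : 1 ≤ n.toNat := by omega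
      have hTv : (if v ≠ 0 then Gv data n.toNat m + 1 else Gv data n.toNat m)
          = Gv data n.toNat m + Tv data m := by
        simp only [Tv, hv]
        by_cases hv0 : v ≠ 0 <;> simp [hv0]
      rw [hTv]
      have hcond : (n ≤ (m : Int) ∧ PySem.List.pyGetD data ((m : Int) - n) 0 ≠ 0)
          ↔ (n.toNat ≤ m ∧ data.getD (m - n.toNat) 0 ≠ 0) := by
        constructor
        · rintro ⟨h1, h2⟩
          refine ⟨by omega, ?_⟩
          have he : (m : Int) - n = ((m - n.toNat : Nat) : Int) := by omega
          rwa [he, PySem.List.pyGetD_natCast] at h2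
        · rintro ⟨h1, h2⟩
          refine ⟨by omega, ?_⟩
          have he : (m : Int) - n = ((m - n.toNat : Nat) : Int) := by omega
          rw [he, PySem.List.pyGetD_natCast]
          exact h2
      have hsub :
          (if n ≤ (m : Int) ∧ PySem.List.pyGetD data ((m : Int) - n) 0 ≠ 0 then
              Gv data n.toNat m + Tv data m - 1
            else Gv data n.toNat m + Tv data m)
            = Gv data n.toNat m + Tv data m
              - (if n.toNat ≤ m then Tv data (m - n.toNat) else 0) := by
        by_cases hc : n.toNat ≤ m ∧ data.getD (m - n.toNat) 0 ≠ 0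
        · rw [if_pos (hcond.mpr hc), if_pos hc.1]
          have h1 : Tv data (m - n.toNat) = 1 := by unfold Tv; rw [if_pos hc.2]
          rw [h1]
        · rw [if_neg (fun hx => hc (hcond.mp hx))]
          by_cases hm' : n.toNat ≤ m
          · have hv0 : ¬ data.getD (m - n.toNat) 0 ≠ 0 := fun hx => hc ⟨hm', hx⟩
            rw [if_pos hm']
            have h1 : Tv data (m - n.toNat) = 0 := by unfold Tv; rw [if_neg hv0]
            rw [h1]
            simp
          · rw [if_neg hm']
            simp
      rw [hsub]
      cases m with
      | zero =>
        have : ¬ n.toNat ≤ 0 := by omega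
        rw [if_neg this]
        simp [Gv, Fw_zero data n.toNat hnn1]
      | succ m' =>
        simp only [Gv]
        rw [Fw_succ data n.toNat hnn1 m']
    rw [hc2]
    have hacc : ((List.range m).map (fun i => Fw data n.toNat i)) ++ [Fw data n.toNat m]
        = (List.range (m + 1)).map (fun i => Fw data n.toNat i) := by
      rw [List.range_succ]
      simp
    rw [hacc]
    have hcast : (m : Int) + 1 = ((m + 1 : Nat) : Int) := by push_cast; ring
    rw [hcast]
    have hGv : Fw data n.toNat m = Gv data n.toNat (m + 1) := rfl
    rw [hGv]
    exact ih (m + 1) (by omega) hdrop'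

-- ===== VERDICT (by name: the statement is the Claim_ definition above) =====
theorem COUNT_spec : Claim_equal_COUNT := by
  intro data n _
  unfold Spec_COUNT COUNT_alt
  by_cases hn : n ≤ 0
  · rw [if_pos hn, COUNT_eq]
    have h0 : n.toNat = 0 := by omega
    simp [h0, Fw]
  · rw [if_neg hn, COUNT_eq]
    have h := foldB_eq data n (by omega) data 0 (by omega) (by simp)
    simp only [Nat.cast_zero, Gv, List.range_zero, List.map_nil] at h
    rw [h]
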